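-- pv_equiv track=rewrite | github.com/jnpushkin/nba_processor | nba_processor/utils/helpers.py | is_near_double_double
-- ===== SOURCE A (Python) =====
-- from typing import Any, Optional, Union
--
-- def safe_int(value: Any, default: int = 0) -> int:
--     """Safely convert a value to int."""
--     if value is None:
--         return default
--     if isinstance(value, int):
--         return value
--     if isinstance(value, float):
--         return int(value)
--     if isinstance(value, str):
--         try:
--             # Handle strings like "12.0"
--             return int(float(value.strip()))
--         except (ValueError, AttributeError):
--             return default
--     return default
--
-- def is_near_double_double(stats: dict, threshold: int = 10, near_threshold: int = 8) -> bool: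
--     """Check if stats constitute a near double-double.
--
--     Args:
--         stats: Dictionary with player stats
--         threshold: Threshold for full category (default 10)
--         near_threshold: Threshold for near category (default 8)
--
--     Returns:
--         True if near double-double (1 category at 10+, 1 at 8-9)
--     """
--     categories = ['pts', 'trb', 'ast', 'stl', 'blk']
--     at_threshold = sum(1 for cat in categories if safe_int(stats.get(cat, 0)) >= threshold)
--     near = sum(1 for cat in categories
--                if near_threshold <= safe_int(stats.get(cat, 0)) < threshold)
--
--     # Already a double-double, not "near"
--     if at_threshold >= 2:
--         return False
--     return at_threshold == 1 and near >= 1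
-- ===== SOURCE B (Python) =====
-- def safe_int(value, default=0):
--     """Safely convert a value to int."""
--     if value is None:
--         return default
--     if isinstance(value, int):
--         return value
--     if isinstance(value, float):
--         return int(value)
--     if isinstance(value, str):
--         try:
--             return int(float(value.strip()))
--         except (ValueError, AttributeError):
--             return default
--     return default
--
-- def is_near_double_double(stats, threshold=10, near_threshold=8):
--     # Order-statistics view: a near double-double means the best category reaches
--     # the full threshold while the second-best sits in the near band [near, threshold).
--     values = sorted((safe_int(stats.get(c, 0)) for c in ('pts', 'trb', 'ast', 'stl', 'blk')),
--                     reverse=True)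
--     return values[0] >= threshold and near_threshold <= values[1] < threshold
-- ===== Notes on version B (the rewrite author's own statement) =====
-- stated objective: alternative
-- what changed: Replaces A's two counting passes (count of categories at threshold, count in the near band) and its count-based decision with an order-statistics formulation: sort the five category values descending once and test that the maximum reaches the threshold while the second-largest lies in [near_threshold, threshold).
import Mathlib
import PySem

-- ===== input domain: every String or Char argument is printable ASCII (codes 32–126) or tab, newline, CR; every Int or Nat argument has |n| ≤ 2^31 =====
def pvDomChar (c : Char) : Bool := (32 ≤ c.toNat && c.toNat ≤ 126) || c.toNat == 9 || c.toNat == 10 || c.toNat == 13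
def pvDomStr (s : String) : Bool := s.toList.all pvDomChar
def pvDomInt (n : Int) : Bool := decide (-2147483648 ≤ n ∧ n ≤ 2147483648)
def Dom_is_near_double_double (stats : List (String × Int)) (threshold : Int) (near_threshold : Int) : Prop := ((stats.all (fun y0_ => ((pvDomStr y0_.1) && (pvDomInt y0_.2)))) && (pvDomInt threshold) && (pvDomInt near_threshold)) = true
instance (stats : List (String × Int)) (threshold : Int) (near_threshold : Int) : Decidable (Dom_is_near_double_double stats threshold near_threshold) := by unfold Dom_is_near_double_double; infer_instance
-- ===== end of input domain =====

-- B replaces A's two counting passes and count-based decision by an order-statistics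
-- test: sort the five category values descending and check max ≥ threshold and
-- second-max in [near_threshold, threshold); return value proved equal everywhere.
-- (dict values are Int here, so Python's safe_int on them is the identity in both ports.)

-- ===== PORT A =====
-- A: two separate sum(1 for cat ... if cond) passes over the fixed category list,
-- each re-fetching stats.get(cat, 0); then the final branch logic.
def is_near_double_double (stats : List (String × Int)) (threshold : Int) (near_threshold : Int) : Bool :=
  let categories : List String := ["pts", "trb", "ast", "stl", "blk"]
  let at_threshold : Int := categories.foldl
    (fun acc cat => if threshold ≤ PySem.Dict.getD (PySem.Dict.mk stats) cat 0 then acc + 1 else acc) 0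
  let near : Int := categories.foldl
    (fun acc cat => if near_threshold ≤ PySem.Dict.getD (PySem.Dict.mk stats) cat 0 ∧ PySem.Dict.getD (PySem.Dict.mk stats) cat 0 < threshold then acc + 1 else acc) 0
  if 2 ≤ at_threshold then false
  else at_threshold == 1 && decide (1 ≤ near)

-- ===== PORT B =====
-- B: sorted(values, reverse=True), then the test on values[0] and values[1].
-- The list always has five elements, so Python's values[0]/values[1] never raise;
-- the match transcribes that indexing (the `_ => false` arm is unreachable).
def is_near_double_double_alt (stats : List (String × Int)) (threshold : Int) (near_threshold : Int) : Bool :=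
  let values := PySem.List.sorted
    (["pts", "trb", "ast", "stl", "blk"].map (fun c => PySem.Dict.getD (PySem.Dict.mk stats) c 0))
    (fun v => v) true
  match values with
  | v0 :: v1 :: _ => decide (threshold ≤ v0) && decide (near_threshold ≤ v1 ∧ v1 < threshold)
  | _ => false

-- ===== PRECONDITION & SPEC =====
def Spec_is_near_double_double (stats : List (String × Int)) (threshold : Int) (near_threshold : Int) (out : Bool) : Prop := out = is_near_double_double_alt stats threshold near_threshold
instance (stats : List (String × Int)) (threshold : Int) (near_threshold : Int) (out : Bool) : Decidable (Spec_is_near_double_double stats threshold near_threshold out) := by unfold Spec_is_near_double_double; infer_instance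

-- ===== CLAIM (what is proved, stated in full; the proofs are below) =====
def Claim_equal_is_near_double_double : Prop := ∀ (stats : List (String × Int)) (threshold : Int) (near_threshold : Int), Dom_is_near_double_double stats threshold near_threshold → Spec_is_near_double_double stats threshold near_threshold (is_near_double_double stats threshold near_threshold)

-- ===== LEMMAS AND PROOFS =====

-- A's 0/1-summing fold is a countP (as an Int), for any starting accumulator.
theorem pvFoldlCount {α : Type} (p : α → Prop) [DecidablePred p] :
    ∀ (l : List α) (n : Int),
      l.foldl (fun acc x => if p x then acc + 1 else acc) n
        = n + (l.countP (fun x => decide (p x)) : Int) := by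
  intro l
  induction l with
  | nil => intro n; simp
  | cons x tl ih =>
    intro n
    by_cases h : p x
    · simp [h, ih]
      omega
    · simp [h, ih]

-- The count-based decision over five values, read on their descending rearrangement
-- w0 ≥ w1 ≥ w2 ≥ w3 ≥ w4, is exactly the top-two test.
theorem pvTopTwoP (t n w0 w1 w2 w3 w4 : Int)
    (h01 : w1 ≤ w0) (h12 : w2 ≤ w1) (h23 : w3 ≤ w2) (h34 : w4 ≤ w3) :
    (¬ 2 ≤ [w0, w1, w2, w3, w4].countP (fun v => decide (t ≤ v)) ∧
     [w0, w1, w2, w3, w4].countP (fun v => decide (t ≤ v)) = 1 ∧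
     1 ≤ [w0, w1, w2, w3, w4].countP (fun v => decide (n ≤ v ∧ v < t)))
    ↔ (t ≤ w0 ∧ n ≤ w1 ∧ w1 < t) := by
  simp only [List.countP_cons, List.countP_nil, decide_eq_true_eq]
  by_cases hA : t ≤ w1
  · -- two categories reach t: both sides false
    have hB : t ≤ w0 := hA.trans h01
    apply iff_of_false
    · rintro ⟨h1, -, -⟩
      apply h1
      rw [if_pos hA, if_pos hB]
      split_ifs <;> omega
    · rintro ⟨-, -, hw⟩
      omega
  · by_cases hB : t ≤ w0
    · by_cases hC : n ≤ w1
      · -- exactly one at t, second-best in the near band: both sides true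
        apply iff_of_true
        · refine ⟨?_, ?_, ?_⟩ <;> split_ifs <;> omega
        · exact ⟨hB, hC, not_le.mp hA⟩
      · -- near band empty (its best candidate w1 misses it): both sides false
        apply iff_of_false
        · rintro ⟨-, -, h3⟩
          revert h3
          split_ifs <;> omega
        · rintro ⟨-, hc, -⟩
          exact hC hc
    · -- nothing reaches t: both sides false
      apply iff_of_false
      · rintro ⟨-, h2, -⟩
        revert h2
        split_ifs <;> omega
      · rintro ⟨h, -⟩
        exact hB h

-- a list of length five is an explicit five-element list
theorem pvList5 (l : List Int) (h : l.length = 5) :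
    ∃ w0 w1 w2 w3 w4, l = [w0, w1, w2, w3, w4] := by
  match l, h with
  | [a, b, c, d, e], _ => exact ⟨a, b, c, d, e, rfl⟩

-- ===== VERDICT (by name: the statement is the Claim_ definition above) =====
theorem is_near_double_double_spec : Claim_equal_is_near_double_double := by
  intro stats threshold near_threshold _
  unfold Spec_is_near_double_double is_near_double_double is_near_double_double_alt
  simp only [pvFoldlCount, zero_add]
  -- name the sorted list of the five looked-up values and destructure it
  have hperm := PySem.List.sorted_perm
    (["pts", "trb", "ast", "stl", "blk"].map (fun c => PySem.Dict.getD (PySem.Dict.mk stats) c 0))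
    (fun v => v) true
  have hpair := PySem.List.sorted_pairwise_rev
    (["pts", "trb", "ast", "stl", "blk"].map (fun c => PySem.Dict.getD (PySem.Dict.mk stats) c 0))
    (fun v => v)
  have hlen : (PySem.List.sorted
      (["pts", "trb", "ast", "stl", "blk"].map (fun c => PySem.Dict.getD (PySem.Dict.mk stats) c 0))
      (fun v => v) true).length = 5 := by
    rw [hperm.length_eq]; simp
  obtain ⟨w0, w1, w2, w3, w4, hsl⟩ := pvList5 _ hlen
  rw [hsl] at hperm hpair
  simp only [List.pairwise_cons, List.mem_cons] at hpair
  -- counts over the category names = counts over the sorted value list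
  have hcH : (["pts", "trb", "ast", "stl", "blk"].countP
        (fun cat => decide (threshold ≤ PySem.Dict.getD (PySem.Dict.mk stats) cat 0)))
      = [w0, w1, w2, w3, w4].countP (fun v => decide (threshold ≤ v)) := by
    have h1 := hperm.countP_eq (fun v => decide (threshold ≤ v))
    rw [List.countP_map] at h1
    exact h1.symm
  have hcM : (["pts", "trb", "ast", "stl", "blk"].countP
        (fun cat => decide (near_threshold ≤ PySem.Dict.getD (PySem.Dict.mk stats) cat 0 ∧
          PySem.Dict.getD (PySem.Dict.mk stats) cat 0 < threshold)))
      = [w0, w1, w2, w3, w4].countP (fun v => decide (near_threshold ≤ v ∧ v < threshold)) := by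
    have h1 := hperm.countP_eq (fun v => decide (near_threshold ≤ v ∧ v < threshold))
    rw [List.countP_map] at h1
    exact h1.symm
  rw [hcH, hcM, hsl]
  show _ = (decide (threshold ≤ w0) && decide (near_threshold ≤ w1 ∧ w1 < threshold))
  -- both sides are now expressions in w0 … w4; finish with the top-two lemma
  have L := pvTopTwoP threshold near_threshold w0 w1 w2 w3 w4
    (by simp_all) (by simp_all) (by simp_all) (by simp_all)
  by_cases hR : threshold ≤ w0 ∧ near_threshold ≤ w1 ∧ w1 < threshold
  · obtain ⟨h1, h2, h3⟩ := L.mpr hR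
    have h1' : ¬ (2:Int) ≤ ([w0, w1, w2, w3, w4].countP (fun v => decide (threshold ≤ v)) : Int) := by
      exact_mod_cast h1
    rw [if_neg h1']
    have hrt : (decide (threshold ≤ w0) && decide (near_threshold ≤ w1 ∧ w1 < threshold)) = true := by
      simp [hR.1, hR.2.1, hR.2.2]
    rw [hrt]
    simp only [Bool.and_eq_true, beq_iff_eq, decide_eq_true_eq]
    omega
  · have hrf : (decide (threshold ≤ w0) && decide (near_threshold ≤ w1 ∧ w1 < threshold)) = false := by
      simp only [Bool.and_eq_false_iff, decide_eq_false_iff_not]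
      tauto
    rw [hrf]
    by_cases h2 : (2:Int) ≤ ([w0, w1, w2, w3, w4].countP (fun v => decide (threshold ≤ v)) : Int)
    · rw [if_pos h2]
    · rw [if_neg h2]
      have hn : ¬ ([w0, w1, w2, w3, w4].countP (fun v => decide (threshold ≤ v)) = 1 ∧
          1 ≤ [w0, w1, w2, w3, w4].countP (fun v => decide (near_threshold ≤ v ∧ v < threshold))) := by
        rintro ⟨ha, hb⟩
        exact hR (L.mp ⟨by exact_mod_cast h2, ha, hb⟩)
      simp only [Bool.and_eq_false_iff, beq_eq_false_iff_ne, ne_eq, decide_eq_false_iff_not]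
      omega
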